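-- pv_equiv track=rewrite | github.com/Rafa658/Data_Preparation | genre_code.py | genre_code
-- ===== SOURCE A (Python) =====
-- def genre_code(genres):
--
--     options = ["Action",
-- 	"Adventure",
-- 	"Animation",
-- 	"Children's",
-- 	"Comedy",
-- 	"Crime",
-- 	"Documentary",
-- 	"Drama",
-- 	"Fantasy",
-- 	"Film-Noir",
-- 	"Horror",
-- 	"Musical",
-- 	"Mystery",
-- 	"Romance",
-- 	"Sci-Fi",
-- 	"Thriller",
-- 	"War",
-- 	"Western"]
--
--     acc = 0 # acumulador
--     for genre in genres:
--         if genre not in options: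
--             acc+=0
--         else:
--             acc+=2**options.index(genre)
--
--     return acc
-- ===== SOURCE B (Python) =====
-- def genre_code(genres):
--     options = ["Action",
--         "Adventure",
--         "Animation",
--         "Children's",
--         "Comedy",
--         "Crime",
--         "Documentary",
--         "Drama",
--         "Fantasy",
--         "Film-Noir",
--         "Horror",
--         "Musical",
--         "Mystery",
--         "Romance",
--         "Sci-Fi",
--         "Thriller",
--         "War",
--         "Western"]
--
--     # one pass over the input to build a multiplicity table
--     counts = {}
--     for g in genres:
--         counts[g] = counts.get(g, 0) + 1
--
--     # one pass over the fixed table, doubling the weight as we go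
--     acc = 0
--     w = 1
--     for opt in options:
--         acc += counts.get(opt, 0) * w
--         w *= 2
--     return acc
-- ===== Notes on version B (the rewrite author's own statement) =====
-- stated objective: alternative
-- what changed: B inverts the traversal: it builds a multiplicity dict of the input in one pass and then walks the fixed 18-entry options table once with a doubling weight, instead of rescanning options twice (membership test + .index) per input element.
import Mathlib
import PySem

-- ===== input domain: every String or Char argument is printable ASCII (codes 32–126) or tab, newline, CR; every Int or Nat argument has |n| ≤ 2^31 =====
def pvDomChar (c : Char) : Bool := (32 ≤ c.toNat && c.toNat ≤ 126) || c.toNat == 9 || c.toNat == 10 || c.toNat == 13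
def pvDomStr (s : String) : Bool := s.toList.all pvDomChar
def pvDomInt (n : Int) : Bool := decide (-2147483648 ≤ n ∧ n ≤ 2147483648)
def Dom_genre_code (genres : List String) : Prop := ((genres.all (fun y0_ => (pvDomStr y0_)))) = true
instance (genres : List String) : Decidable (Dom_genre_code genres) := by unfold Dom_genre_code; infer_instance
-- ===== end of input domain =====

-- B inverts the traversal: one counting pass over the input, then one weighted pass over
-- the fixed options table, instead of A's per-element rescans (objective: alternative).

-- the fixed genre table (`options` in both Pythons)
def pvOptions : List String :=
  ["Action", "Adventure", "Animation", "Children's", "Comedy", "Crime",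
   "Documentary", "Drama", "Fantasy", "Film-Noir", "Horror", "Musical",
   "Mystery", "Romance", "Sci-Fi", "Thriller", "War", "Western"]

-- ===== PORT A =====
def genre_code (genres : List String) : Int :=
  genres.foldl
    (fun acc genre =>
      if ¬ (pvOptions.contains genre) then acc + 0
      else acc + 2 ^ ((PySem.List.index? pvOptions genre).getD 0))
    0

-- ===== PORT B =====
def genre_code_alt (genres : List String) : Int :=
  let counts : PySem.Dict String Int :=
    genres.foldl (fun d g => d.insert g (d.getD g 0 + 1)) PySem.Dict.empty
  (pvOptions.foldl
    (fun (st : Int × Int) opt => (st.1 + counts.getD opt 0 * st.2, st.2 * 2))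
    (0, 1)).1

-- ===== PRECONDITION & SPEC =====
def Spec_genre_code (genres : List String) (out : Int) : Prop := out = genre_code_alt genres
instance (genres : List String) (out : Int) : Decidable (Spec_genre_code genres out) := by unfold Spec_genre_code; infer_instance

-- ===== CLAIM (what is proved, stated in full; the proofs are below) =====
def Claim_equal_genre_code : Prop := ∀ (genres : List String), Dom_genre_code genres → Spec_genre_code genres (genre_code genres)

-- ===== LEMMAS AND PROOFS =====

-- B's table fold, abstracted over the count function
def pvFold (c : String → Int) (opts : List String) (st : Int × Int) : Int × Int :=
  opts.foldl (fun st o => (st.1 + c o * st.2, st.2 * 2)) st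

theorem pvFold_shift (c : String → Int) (opts : List String) (a d w : Int) :
    (pvFold c opts (a + d, w)).1 = (pvFold c opts (a, w)).1 + d := by
  induction opts generalizing a w with
  | nil => rfl
  | cons o os ih =>
    simp only [pvFold, List.foldl_cons] at *
    rw [show a + d + c o * w = (a + c o * w) + d by ring]
    exact ih _ _

theorem pvFold_zero (c : String → Int) (opts : List String) (h : ∀ o ∈ opts, c o = 0)
    (a w : Int) : (pvFold c opts (a, w)).1 = a := by
  induction opts generalizing a w with
  | nil => rfl
  | cons o os ih =>
    simp only [pvFold, List.foldl_cons] at *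
    rw [h o (List.mem_cons_self), mul_comm, mul_zero, add_zero]
    exact ih (fun o ho => h o (List.mem_cons_of_mem _ ho)) _ _

theorem pvFold_step (g : String) (gs : List String) (opts : List String)
    (hnd : opts.Nodup) (a w : Int) :
    (pvFold (fun o => (((g :: gs).count o : Nat) : Int)) opts (a, w)).1
      = (pvFold (fun o => ((gs.count o : Nat) : Int)) opts (a, w)).1
        + (match PySem.List.index? opts g with
           | some k => w * 2 ^ k
           | none => 0) := by
  induction opts generalizing a w with
  | nil =>
    have : PySem.List.index? ([] : List String) g = none := by
      simp [PySem.List.index?_eq_none_iff]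
    simp [pvFold, this]
  | cons o os ih =>
    rcases List.nodup_cons.mp hnd with ⟨hon, hnd'⟩
    by_cases hog : o = g
    · subst hog
      rw [PySem.List.index?_cons_self]
      simp only [pvFold, List.foldl_cons]
      have hcnt : ((o :: gs).count o : Int) = (gs.count o : Int) + 1 := by
        simp [List.count_cons]
      have hcongr :
          (List.foldl (fun st o' => (st.1 + (((o :: gs).count o' : Nat) : Int) * st.2, st.2 * 2))
            (a + ((o :: gs).count o : Int) * w, w * 2) os)
          = (List.foldl (fun st o' => (st.1 + ((gs.count o' : Nat) : Int) * st.2, st.2 * 2))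
            (a + ((o :: gs).count o : Int) * w, w * 2) os) := by
        apply PySem.List.foldl_congr_mem
        intro acc x hx
        have hxg : x ≠ o := fun h => hon (h ▸ hx)
        simp only [List.count_cons]
        simp [hxg, Ne.symm hxg]
      rw [hcongr, hcnt]
      rw [show a + ((gs.count o : Int) + 1) * w = (a + (gs.count o : Int) * w) + w by ring]
      have := pvFold_shift (fun o' => ((gs.count o' : Nat) : Int)) os
        (a + (gs.count o : Int) * w) w (w * 2)
      simp only [pvFold] at this
      rw [this]
      simp
    · have hne : o ≠ g := hog
      rw [PySem.List.index?_cons_of_ne _ hne]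
      simp only [pvFold, List.foldl_cons]
      have hcnt : (((g :: gs).count o : Nat) : Int) = ((gs.count o : Nat) : Int) := by
        simp [List.count_cons, Ne.symm hne]
      rw [hcnt]
      have := ih hnd' (a + ((gs.count o : Nat) : Int) * w) (w * 2)
      simp only [pvFold] at this
      rw [this]
      cases h : PySem.List.index? os g with
      | none => simp
      | some k => simp [pow_succ]; ring

-- A's per-element weight equals B's matched weight at w = 1
theorem pvWeight_eq (g : String) :
    (if ¬ (pvOptions.contains g) then (0 : Int)
     else 2 ^ ((PySem.List.index? pvOptions g).getD 0))
      = (match PySem.List.index? pvOptions g with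
         | some k => (1 : Int) * 2 ^ k
         | none => 0) := by
  cases h : PySem.List.index? pvOptions g with
  | none =>
    have : g ∉ pvOptions := (PySem.List.index?_eq_none_iff _ _).mp h
    simp [List.contains_iff_mem, this]
  | some k =>
    have hmem : g ∈ pvOptions := by
      have : (PySem.List.index? pvOptions g).isSome := by rw [h]; rfl
      exact (PySem.List.index?_isSome_iff _ _).mp this
    simp [List.contains_iff_mem, hmem, h]

theorem pvOptions_nodup : pvOptions.Nodup := by
  have h : (pvOptions.map String.toList).Nodup := by decide
  exact h.of_map String.toList

theorem genre_code_alt_eq_fold (genres : List String) :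
    genre_code_alt genres
      = (pvFold (fun o => ((genres.count o : Nat) : Int)) pvOptions (0, 1)).1 := by
  simp only [genre_code_alt, pvFold,
    PySem.Dict.foldl_insert_getD_add_one_eq_counter, PySem.Dict.getD_counter]

theorem pvA_form (l : List String) (a : Int) :
    List.foldl
      (fun acc genre =>
        if ¬ (pvOptions.contains genre) then acc + 0
        else acc + 2 ^ ((PySem.List.index? pvOptions genre).getD 0)) a l
    = a + (l.map (fun genre =>
        if ¬ (pvOptions.contains genre) then (0 : Int)
        else 2 ^ ((PySem.List.index? pvOptions genre).getD 0))).sum := by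
  rw [← PySem.List.foldl_add l _ a]
  apply PySem.List.foldl_congr_mem
  intro acc x _
  split_ifs <;> simp

theorem genre_code_eq_alt (genres : List String) :
    genre_code genres = genre_code_alt genres := by
  induction genres with
  | nil =>
    rw [genre_code_alt_eq_fold]
    simp only [genre_code, List.foldl_nil]
    rw [pvFold_zero _ _ (by simp)]
  | cons g gs ih =>
    have hA : genre_code (g :: gs)
        = (if ¬ (pvOptions.contains g) then (0 : Int)
           else 2 ^ ((PySem.List.index? pvOptions g).getD 0)) + genre_code gs := by
      simp only [genre_code]
      rw [pvA_form (g :: gs) 0, pvA_form gs 0]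
      simp [add_comm]
    rw [hA, ih, genre_code_alt_eq_fold gs, genre_code_alt_eq_fold (g :: gs),
      pvFold_step g gs pvOptions pvOptions_nodup 0 1, pvWeight_eq]
    ring

-- ===== VERDICT (by name: the statement is the Claim_ definition above) =====
theorem genre_code_spec : Claim_equal_genre_code := by
  intro genres _
  unfold Spec_genre_code
  exact genre_code_eq_alt genres
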